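-- pv_equiv track=rewrite | github.com/MagicWinnie/IU_DataStructuresAndAlgorithms | week_6/theory_task_3.py | counting_sort_length
-- ===== SOURCE A (Python) =====
-- from typing import List
--
-- def counting_sort_length(A: List[int]) -> List[int]:
--     count = [0 for _ in range(len(str(max(A))) + 1)]
--     accum = [0 for _ in range(len(str(max(A))) + 1)]
--
--     for i in range(len(A)):
--         count[len(str(A[i]))] += 1
--
--     for i in range(len(count)):
--         accum[i] = count[i] + accum[i - 1]
--
--     output_arr = [0 for _ in range(len(A))]
--
--     for i in range(len(A) - 1, -1, -1):
--         output_arr[accum[len(str(A[i]))] - 1] = A[i]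
--         accum[len(str(A[i]))] -= 1
--
--     return output_arr
-- ===== SOURCE B (Python) =====
-- from typing import List
--
-- def counting_sort_length(A: List[int]) -> List[int]:
--     m = len(str(max(A)))
--     buckets = [[] for _ in range(m + 1)]
--     for x in A:
--         buckets[len(str(x))].append(x)
--     result = []
--     for b in buckets:
--         result.extend(b)
--     return result
-- ===== Notes on version B (the rewrite author's own statement) =====
-- stated objective: simpler
-- what changed: Replaces the count/prefix-sum arrays and backward index placement with direct buckets: one forward pass appends each element to buckets[len(str(x))] and the result is the concatenation of the buckets, stability coming from forward iteration.
import Mathlib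
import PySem

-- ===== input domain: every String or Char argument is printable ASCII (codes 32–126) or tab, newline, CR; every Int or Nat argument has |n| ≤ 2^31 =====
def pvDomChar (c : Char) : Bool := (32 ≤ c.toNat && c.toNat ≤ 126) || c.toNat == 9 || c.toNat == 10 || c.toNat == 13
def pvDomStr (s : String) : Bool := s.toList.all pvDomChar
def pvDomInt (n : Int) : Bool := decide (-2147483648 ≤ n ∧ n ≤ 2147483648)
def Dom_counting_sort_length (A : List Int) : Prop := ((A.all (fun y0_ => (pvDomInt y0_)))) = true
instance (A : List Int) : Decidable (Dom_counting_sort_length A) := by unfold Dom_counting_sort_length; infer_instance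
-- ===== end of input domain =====

-- B replaces A's count/prefix-sum arrays and backward index placement with forward bucket appends
-- and concatenation (objective: simpler); equivalent on Pre_ (A raises ValueError/IndexError elsewhere).


-- len(str(x)), shared by both Pythons
def cslKey (x : Int) : Nat := (PySem.Int.toChars x).length

-- ===== PORT A =====
def counting_sort_length (A : List Int) : List Int :=
  match PySem.List.max? A (fun y => y) with
  | none => []   -- max(A) raises ValueError on empty A; excluded by Pre_
  | some mx =>
    -- count = [0]*(len(str(max(A)))+1); for i in range(len(A)): count[len(str(A[i]))] += 1
    -- (count[k] += 1 raises IndexError when k is out of range: excluded by Pre_)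
    let count := (PySem.List.pyRange 0 (A.length : Int) 1).foldl
      (fun c i => c.set (cslKey (PySem.List.pyGetD A i 0))
                        (c.getD (cslKey (PySem.List.pyGetD A i 0)) 0 + 1))
      (List.replicate (cslKey mx + 1) (0 : Int))
    -- accum = [0]*(len(str(max(A)))+1); for i in range(len(count)): accum[i] = count[i] + accum[i-1]
    let accum := (PySem.List.pyRange 0 ((cslKey mx + 1 : Nat) : Int) 1).foldl
      (fun a i => PySem.List.pySetD a i (PySem.List.pyGetD count i 0 + PySem.List.pyGetD a (i - 1) 0))
      (List.replicate (cslKey mx + 1) (0 : Int))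
    -- output_arr = [0]*len(A); for i in range(len(A)-1,-1,-1): place A[i]; decrement accum
    (((PySem.List.pyRange ((A.length : Int) - 1) (-1) (-1)).foldl
      (fun (s : List Int × List Int) i =>
        (PySem.List.pySetD s.1 (PySem.List.pyGetD s.2 ((cslKey (PySem.List.pyGetD A i 0) : Nat) : Int) 0 - 1)
           (PySem.List.pyGetD A i 0),
         PySem.List.pySetD s.2 ((cslKey (PySem.List.pyGetD A i 0) : Nat) : Int)
           (PySem.List.pyGetD s.2 ((cslKey (PySem.List.pyGetD A i 0) : Nat) : Int) 0 - 1)))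
      (List.replicate A.length (0 : Int), accum))).1

-- ===== PORT B =====
def counting_sort_length_alt (A : List Int) : List Int :=
  match PySem.List.max? A (fun y => y) with
  | none => []   -- max(A) raises ValueError on empty A; excluded by Pre_
  | some mx =>
    -- buckets = [[] for _ in range(m+1)]; for x in A: buckets[len(str(x))].append(x)
    -- (buckets[k].append raises IndexError when k is out of range: excluded by Pre_)
    let buckets := A.foldl (fun bs x => bs.modify (cslKey x) (fun b => b ++ [x]))
      (List.replicate (cslKey mx + 1) ([] : List Int))
    -- result = []; for b in buckets: result.extend(b)
    buckets.foldl (fun r b => r ++ b) []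

-- ===== PRECONDITION & SPEC =====
-- Pre_ excludes exactly the inputs where the Python raises: empty A (ValueError from max) and lists
-- containing an element whose str() is longer than str(max(A)) (IndexError in both A and B).
def Pre_counting_sort_length (A : List Int) : Prop :=
  A ≠ [] ∧ ∀ x ∈ A, cslKey x ≤ cslKey ((PySem.List.max? A (fun y => y)).getD 0)
instance (A : List Int) : Decidable (Pre_counting_sort_length A) := by
  unfold Pre_counting_sort_length; infer_instance

def pvWitness_counting_sort_length : List Int := [3, -12, 100]

def Spec_counting_sort_length (A : List Int) (out : List Int) : Prop := out = counting_sort_length_alt A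
instance (A : List Int) (out : List Int) : Decidable (Spec_counting_sort_length A out) := by
  unfold Spec_counting_sort_length; infer_instance

-- ===== CLAIM (what is proved, stated in full; the proofs are below) =====
def Claim_equal_counting_sort_length : Prop :=
  ∀ (A : List Int), Dom_counting_sort_length A → Pre_counting_sort_length A →
    Spec_counting_sort_length A (counting_sort_length A)

-- ===== LEMMAS AND PROOFS =====

-- number of elements of A with key = k / key < k
def cslCnt (A : List Int) (k : Nat) : Nat := A.countP (fun y => cslKey y = k)
def cslPl (A : List Int) (k : Nat) : Nat := A.countP (fun y => cslKey y < k)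

-- the common target: concatenation of the key-buckets
def cslFlat (A : List Int) (m : Nat) : List Int :=
  (List.range (m + 1)).flatMap (fun k => A.filter (fun x => cslKey x = k))

-- the first element of L written at output position p by A's backward loop (acc = initial accum)
def cslFirstHit : List Int → List Int → Nat → Option Int
  | [], _, _ => none
  | x :: r, acc, p =>
      if acc.getD (cslKey x) 0 - (r.countP (fun y => cslKey y = cslKey x) : Int) - 1 = (p : Int)
      then some x else cslFirstHit r acc p

lemma cslPl_zero (A : List Int) : cslPl A 0 = 0 := by
  simp [cslPl]

lemma cslPl_succ (A : List Int) (k : Nat) : cslPl A (k + 1) = cslPl A k + cslCnt A k := by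
  unfold cslPl cslCnt
  induction A with
  | nil => simp
  | cons a t ih =>
    simp only [List.countP_cons]
    rw [ih]
    by_cases h2 : cslKey a < k <;> by_cases h3 : cslKey a = k <;>
      simp [h2, h3, Nat.le_iff_lt_or_eq] <;> omega

lemma cslPl_mono (A : List Int) {k k' : Nat} (h : k ≤ k') : cslPl A k ≤ cslPl A k' := by
  apply List.countP_mono_left
  intro x _ hx
  simp only [decide_eq_true_eq] at hx ⊢
  omega

lemma cslPl_top (A : List Int) (m' : Nat) (h : ∀ x ∈ A, cslKey x < m') : cslPl A m' = A.length := by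
  unfold cslPl
  rw [List.countP_eq_length]
  intro x hx; simp [h x hx]

lemma cslCnt_zero_of_ge (A : List Int) (m' k : Nat) (h : ∀ x ∈ A, cslKey x < m') (hk : m' ≤ k) :
    cslCnt A k = 0 := by
  unfold cslCnt
  rw [List.countP_eq_zero]
  intro x hx; have := h x hx; simp; omega


-- getElem?/getD bridges used throughout (specific combinations of set/modify/append/replicate with getD)
lemma csl_getD_set {α : Type} (l : List α) (i : Nat) (v : α) (j : Nat) (d : α) :
    (l.set i v).getD j d = if i = j ∧ j < l.length then v else l.getD j d := by
  rw [List.getD_eq_getElem?_getD, List.getElem?_set, List.getD_eq_getElem?_getD]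
  by_cases hij : i = j
  · subst hij
    by_cases hi : i < l.length
    · simp [hi]
    · simp [hi]
  · simp [hij]

lemma csl_getD_append_lt {α : Type} (l1 l2 : List α) (n : Nat) (d : α) (h : n < l1.length) :
    (l1 ++ l2).getD n d = l1.getD n d := by
  rw [List.getD_eq_getElem?_getD, List.getElem?_append_left h, List.getD_eq_getElem?_getD]

lemma csl_getD_append_ge {α : Type} (l1 l2 : List α) (n : Nat) (d : α) (h : l1.length ≤ n) :
    (l1 ++ l2).getD n d = l2.getD (n - l1.length) d := by
  rw [List.getD_eq_getElem?_getD, List.getElem?_append_right h, List.getD_eq_getElem?_getD]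

lemma csl_getD_replicate {α : Type} (n j : Nat) (a : α) (d : α) (h : a = d) :
    (List.replicate n a).getD j d = d := by
  rw [List.getD_eq_getElem?_getD, List.getElem?_replicate]
  by_cases hj : j < n <;> simp [hj, h]

-- ===== A-side: the count loop =====
lemma csl_count_loop (L : List Int) : ∀ (c : List Int), (∀ x ∈ L, cslKey x < c.length) →
    (L.foldl (fun c x => c.set (cslKey x) (c.getD (cslKey x) 0 + 1)) c).length = c.length ∧
    ∀ j : Nat, (L.foldl (fun c x => c.set (cslKey x) (c.getD (cslKey x) 0 + 1)) c).getD j 0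
      = c.getD j 0 + (cslCnt L j : Int) := by
  induction L with
  | nil => intro c _; simp [cslCnt]
  | cons x r ih =>
    intro c h
    have hk : cslKey x < c.length := h x (by simp)
    obtain ⟨hlen, hget⟩ := ih (c.set (cslKey x) (c.getD (cslKey x) 0 + 1))
      (fun y hy => by simpa using h y (by simp [hy]))
    refine ⟨by simpa using hlen, ?_⟩
    intro j
    rw [List.foldl_cons, hget j, csl_getD_set]
    have hcnt : cslCnt (x :: r) j = cslCnt r j + (if cslKey x = j then 1 else 0) := by
      simp only [cslCnt, List.countP_cons]
      by_cases hij : cslKey x = j <;> simp [hij]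
    rw [hcnt]
    by_cases hij : cslKey x = j
    · simp [hij, hij ▸ hk]; ring
    · simp [hij]

-- ===== A-side: the prefix-sum (accum) loop =====
def cslAccumStep (count : List Int) (a : List Int) (i : Int) : List Int :=
  PySem.List.pySetD a i (PySem.List.pyGetD count i 0 + PySem.List.pyGetD a (i - 1) 0)

lemma csl_accum_loop (A : List Int) (count : List Int) (m' : Nat) (hm : 0 < m')
    (hc : ∀ j : Nat, count.getD j 0 = (cslCnt A j : Int)) :
    ∀ t : Nat, t ≤ m' →
    ((PySem.List.pyRange 0 (t : Int) 1).foldl (cslAccumStep count)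
        (List.replicate m' (0 : Int))).length = m' ∧
    ∀ j : Nat, ((PySem.List.pyRange 0 (t : Int) 1).foldl (cslAccumStep count)
        (List.replicate m' (0 : Int))).getD j 0
      = if j < t then (cslPl A (j + 1) : Int) else 0 := by
  intro t
  induction t with
  | zero =>
    intro _
    rw [PySem.List.pyRange_one_eq_nil (by omega)]
    simp
  | succ t ih =>
    intro ht
    obtain ⟨hlen, hget⟩ := ih (by omega)
    have hrange : PySem.List.pyRange 0 ((t + 1 : Nat) : Int) 1
        = PySem.List.pyRange 0 (t : Nat) 1 ++ [(t : Int)] := by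
      push_cast
      rw [PySem.List.pyRange_one_succ_right (by omega)]
    rw [hrange, List.foldl_append, List.foldl_cons, List.foldl_nil]
    set a := (PySem.List.pyRange 0 (t : Int) 1).foldl (cslAccumStep count)
        (List.replicate m' (0 : Int)) with ha
    have hread : PySem.List.pyGetD a ((t : Int) - 1) 0 = (cslPl A t : Int) := by
      rcases Nat.eq_zero_or_pos t with h0 | hpos
      · subst h0
        have hne : a ≠ [] := by
          intro hnil; rw [hnil] at hlen; simp at hlen; omega
        rw [show ((0 : Nat) : Int) - 1 = -1 by ring, PySem.List.pyGetD_neg_one a 0 hne]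
        have : a.getLast hne = a.getD (a.length - 1) 0 := by
          rw [List.getLast_eq_getElem, List.getD_eq_getElem?_getD,
            List.getElem?_eq_getElem (by omega)]
          rfl
        rw [this, hget, cslPl_zero]
        simp
      · have hcast : ((t : Int) - 1) = ((t - 1 : Nat) : Int) := by omega
        rw [hcast, PySem.List.pyGetD_natCast, hget (t - 1)]
        have : t - 1 < t := by omega
        simp [this]
        congr 1
        omega
    have hwrite : cslAccumStep count a (t : Int)
        = a.set t ((cslPl A (t + 1) : Int)) := by
      unfold cslAccumStep
      rw [PySem.List.pySetD_natCast, hread, PySem.List.pyGetD_natCast, hc t, cslPl_succ]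
      push_cast; ring_nf
    rw [hwrite]
    refine ⟨by simpa using hlen, ?_⟩
    intro j
    rw [csl_getD_set, hlen]
    by_cases hj : t = j
    · subst hj
      rw [if_pos ⟨rfl, by omega⟩, if_pos (by omega)]
    · rw [if_neg (by tauto), hget j]
      by_cases h1 : j < t
      · rw [if_pos h1, if_pos (by omega)]
      · rw [if_neg h1, if_neg (by omega)]

-- ===== A-side: the backward placement loop =====
def cslStepF (x : Int) (s : List Int × List Int) : List Int × List Int :=
  (PySem.List.pySetD s.1 (PySem.List.pyGetD s.2 ((cslKey x : Nat) : Int) 0 - 1) x,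
   PySem.List.pySetD s.2 ((cslKey x : Nat) : Int)
     (PySem.List.pyGetD s.2 ((cslKey x : Nat) : Int) 0 - 1))

lemma csl_back_loop_eq_foldr (A : List Int) :
    ∀ (t : Nat), t ≤ A.length → ∀ (s : List Int × List Int),
    (PySem.List.pyRange ((t : Int) - 1) (-1) (-1)).foldl
      (fun s i => cslStepF (PySem.List.pyGetD A i 0) s) s
    = (A.take t).foldr cslStepF s := by
  intro t
  induction t with
  | zero => intro _ s; rw [PySem.List.pyRange_neg_one_eq_nil (by omega)]; simp
  | succ t ih =>
    intro ht s
    have hcast : ((t + 1 : Nat) : Int) - 1 = (t : Int) := by push_cast; ring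
    rw [hcast, PySem.List.pyRange_neg_one_cons (by omega), List.foldl_cons]
    rw [PySem.List.pyGetD_natCast]
    have hlt : t < A.length := by omega
    have hA : A.getD t 0 = A[t] := by
      rw [List.getD_eq_getElem?_getD, List.getElem?_eq_getElem hlt]; rfl
    rw [hA, ih (by omega), List.take_succ_eq_append_getElem hlt, List.foldr_append,
      List.foldr_cons, List.foldr_nil]

lemma csl_foldr_state (L : List Int) : ∀ (out acc : List Int),
    (∀ x ∈ L, cslKey x < acc.length) →
    (L.foldr cslStepF (out, acc)).1.length = out.length ∧
    (L.foldr cslStepF (out, acc)).2.length = acc.length ∧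
    ∀ k : Nat, (L.foldr cslStepF (out, acc)).2.getD k 0
      = acc.getD k 0 - (cslCnt L k : Int) := by
  induction L with
  | nil => intro out acc _; simp [cslCnt]
  | cons x r ih =>
    intro out acc h
    obtain ⟨h1, h2, h3⟩ := ih out acc (fun y hy => h y (by simp [hy]))
    rw [List.foldr_cons]
    set s' := r.foldr cslStepF (out, acc) with hs'
    have hk : cslKey x < s'.2.length := by rw [h2]; exact h x (by simp)
    unfold cslStepF
    rw [PySem.List.pySetD_natCast, PySem.List.pyGetD_natCast]
    refine ⟨by simpa using h1, by simpa using h2, ?_⟩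
    intro k
    simp only
    rw [csl_getD_set]
    have hcnt : cslCnt (x :: r) k = cslCnt r k + (if cslKey x = k then 1 else 0) := by
      simp only [cslCnt, List.countP_cons]
      by_cases hij : cslKey x = k <;> simp [hij]
    by_cases hxk : cslKey x = k
    · subst hxk
      rw [if_pos ⟨rfl, by omega⟩, h3 (cslKey x), hcnt]
      simp
      omega
    · rw [if_neg (by tauto), h3 k, hcnt]
      simp [hxk]

lemma csl_foldr_out (L : List Int) : ∀ (out acc : List Int),
    (∀ x ∈ L, cslKey x < acc.length) →
    (∀ k : Nat, (cslCnt L k : Int) ≤ acc.getD k 0) →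
    ∀ p : Nat, p < out.length →
    (L.foldr cslStepF (out, acc)).1.getD p 0
      = (cslFirstHit L acc p).getD (out.getD p 0) := by
  induction L with
  | nil => intro out acc _ _ p _; simp [cslFirstHit]
  | cons x r ih =>
    intro out acc h hcnt p hp
    have hr : ∀ y ∈ r, cslKey y < acc.length := fun y hy => h y (by simp [hy])
    have hcntr : ∀ k : Nat, (cslCnt r k : Int) ≤ acc.getD k 0 := by
      intro k
      refine le_trans ?_ (hcnt k)
      have : cslCnt r k ≤ cslCnt (x :: r) k := by
        simp only [cslCnt, List.countP_cons]; omega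
      exact_mod_cast this
    obtain ⟨h1, h2, h3⟩ := csl_foldr_state r out acc hr
    rw [List.foldr_cons]
    set s' := r.foldr cslStepF (out, acc) with hs'
    unfold cslStepF
    simp only
    rw [PySem.List.pyGetD_natCast, h3 (cslKey x)]
    have hposv : acc.getD (cslKey x) 0 - (cslCnt r (cslKey x) : Int) - 1 ≥ 0 := by
      have := hcnt (cslKey x)
      have : (cslCnt (x :: r) (cslKey x) : Int) = (cslCnt r (cslKey x) : Int) + 1 := by
        simp only [cslCnt, List.countP_cons]; simp
      omega
    rw [PySem.List.pySetD_of_nonneg _ _ hposv]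
    rw [csl_getD_set]
    unfold cslFirstHit
    have hCnteq : (r.countP (fun y => cslKey y = cslKey x) : Int) = (cslCnt r (cslKey x) : Int) := rfl
    by_cases hC : acc.getD (cslKey x) 0 - (cslCnt r (cslKey x) : Int) - 1 = (p : Int)
    · have htn : (acc.getD (cslKey x) 0 - (cslCnt r (cslKey x) : Int) - 1).toNat = p := by omega
      rw [if_pos (by rw [h1]; exact ⟨htn, hp⟩)]
      rw [if_pos (by rw [hCnteq]; exact hC)]
      rfl
    · have htn : (acc.getD (cslKey x) 0 - (cslCnt r (cslKey x) : Int) - 1).toNat ≠ p := by omega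
      rw [if_neg (by intro hcontra; exact htn hcontra.1)]
      rw [if_neg (by rw [hCnteq]; exact hC)]
      exact ih out acc hr hcntr p hp

-- ===== A-side: what the backward loop finds at position p =====
lemma csl_firstHit_spec (A : List Int) (m' : Nat) (acc : List Int)
    (hacc : ∀ k : Nat, acc.getD k 0 = if k < m' then (cslPl A (k + 1) : Int) else 0)
    (hkeys : ∀ x ∈ A, cslKey x < m') :
    ∀ (r P : List Int), A = P ++ r →
    ∀ (k j p : Nat), j < cslCnt A k → cslCnt P k ≤ j → p = cslPl A k + j →
    cslFirstHit r acc p = some ((A.filter (fun x => cslKey x = k)).getD j 0) := by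
  intro r
  induction r with
  | nil =>
    intro P hPA k j p hj hPj hpeq
    rw [List.append_nil] at hPA
    subst hPA
    omega
  | cons x r' ih =>
    intro P hPA k j p hj hPj hpeq
    have hxA : x ∈ A := by rw [hPA]; simp
    have hk' : cslKey x < m' := hkeys x hxA
    have hkm : k < m' := by
      have hpos : 0 < cslCnt A k := by omega
      have : ∃ y ∈ A, cslKey y = k := by
        unfold cslCnt at hpos
        obtain ⟨y, hy, hyk⟩ := List.countP_pos_iff.mp hpos
        exact ⟨y, hy, by simpa using hyk⟩
      obtain ⟨y, hyA, hyk⟩ := this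
      exact hyk ▸ hkeys y hyA
    -- split the k'-count of A around x  (k' := cslKey x)
    have hsplit : cslCnt A (cslKey x) = cslCnt P (cslKey x) + 1 + cslCnt r' (cslKey x) := by
      rw [hPA]
      simp only [cslCnt, List.countP_append, List.countP_cons]
      simp
      omega
    have hplsucc : ∀ kk, cslPl A (kk + 1) = cslPl A kk + cslCnt A kk := cslPl_succ A
    -- the head's write position
    have hcond : (acc.getD (cslKey x) 0 - ((r'.countP (fun y => cslKey y = cslKey x)) : Int) - 1
        = (p : Int)) ↔ (cslPl A (cslKey x) + cslCnt P (cslKey x) = p) := by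
      rw [hacc (cslKey x), if_pos hk']
      have h1 := hplsucc (cslKey x)
      have : (r'.countP (fun y => cslKey y = cslKey x)) = cslCnt r' (cslKey x) := rfl
      rw [this]
      omega
    unfold cslFirstHit
    by_cases hhit : cslKey x = k ∧ cslCnt P k = j
    · obtain ⟨hk1, hk2⟩ := hhit
      rw [if_pos (by rw [hcond, hk1, hk2, hpeq])]
      -- x is exactly the j-th element of A.filter (key = k)
      congr 1
      have hfil : A.filter (fun y => cslKey y = k)
          = P.filter (fun y => cslKey y = k) ++ x :: r'.filter (fun y => cslKey y = k) := by
        rw [hPA, List.filter_append, List.filter_cons, if_pos (by simp [hk1])]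
      rw [hfil]
      have hlenP : (P.filter (fun y => cslKey y = k)).length = j := by
        rw [← hk2, ← List.countP_eq_length_filter]; rfl
      rw [csl_getD_append_ge _ _ _ _ (by omega), hlenP]
      simp
    · rw [if_neg ?_]
      · -- recurse with P ++ [x]
        have hPA' : A = (P ++ [x]) ++ r' := by rw [hPA]; simp
        have hPj' : cslCnt (P ++ [x]) k ≤ j := by
          have : cslCnt (P ++ [x]) k = cslCnt P k + (if cslKey x = k then 1 else 0) := by
            simp only [cslCnt, List.countP_append, List.countP_cons, List.countP_nil]
            by_cases hxy : cslKey x = k <;> simp [hxy]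
          rw [this]
          by_cases hxy : cslKey x = k
          · have : cslCnt P k ≠ j := fun hc => hhit ⟨hxy, hc⟩
            simp [hxy]; omega
          · simp [hxy]; omega
        exact ih (P ++ [x]) hPA' k j p hj hPj' hpeq
      · rw [hcond]
        rcases Nat.lt_trichotomy (cslKey x) k with hlt | heq | hgt
        · -- key x < k : position lies strictly below the k-block
          have h1 : cslCnt P (cslKey x) < cslCnt A (cslKey x) := by omega
          have h2 : cslPl A (cslKey x + 1) ≤ cslPl A k := cslPl_mono A (by omega)
          have h3 := hplsucc (cslKey x)
          omega
        · -- same key: it is an earlier occurrence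
          have : cslCnt P k ≠ j := fun hc => hhit ⟨heq, hc⟩
          rw [heq]
          omega
        · -- key x > k : position lies at or above the end of the k-block
          have h2 : cslPl A (k + 1) ≤ cslPl A (cslKey x) := cslPl_mono A (by omega)
          have h3 := hplsucc k
          omega

lemma csl_decomp (A : List Int) : ∀ (m' p : Nat), p < cslPl A m' →
    ∃ k j : Nat, k < m' ∧ j < cslCnt A k ∧ p = cslPl A k + j := by
  intro m'
  induction m' with
  | zero => intro p hp; rw [cslPl_zero] at hp; omega
  | succ m ih =>
    intro p hp
    by_cases h : p < cslPl A m
    · obtain ⟨k, j, h1, h2, h3⟩ := ih p h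
      exact ⟨k, j, by omega, h2, h3⟩
    · refine ⟨m, p - cslPl A m, by omega, ?_, by omega⟩
      have := cslPl_succ A m
      omega

-- ===== the bucket concatenation, positionally =====
lemma csl_flatlen (A : List Int) : ∀ kk : Nat,
    ((List.range kk).flatMap (fun k => A.filter (fun x => cslKey x = k))).length = cslPl A kk := by
  intro kk
  induction kk with
  | zero => simp [cslPl_zero]
  | succ k ih =>
    rw [List.range_succ, List.flatMap_append, List.length_append, ih, cslPl_succ]
    simp [cslCnt, ← List.countP_eq_length_filter]

lemma csl_flat_getD (A : List Int) : ∀ (mm k j : Nat), k < mm → j < cslCnt A k →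
    ((List.range mm).flatMap (fun k => A.filter (fun x => cslKey x = k))).getD (cslPl A k + j) 0
      = (A.filter (fun x => cslKey x = k)).getD j 0 := by
  intro mm
  induction mm with
  | zero => intro k j h _; omega
  | succ m ih =>
    intro k j hk hj
    rw [List.range_succ, List.flatMap_append]
    by_cases hkm : k < m
    · have hidx : cslPl A k + j < cslPl A m := by
        have h1 := cslPl_succ A k
        have h2 := cslPl_mono A (show k + 1 ≤ m by omega)
        omega
      rw [csl_getD_append_lt _ _ _ _ (by rw [csl_flatlen]; exact hidx)]
      exact ih k j hkm hj
    · have hkm' : k = m := by omega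
      subst hkm'
      rw [csl_getD_append_ge _ _ _ _ (by rw [csl_flatlen]; omega), csl_flatlen]
      simp

-- ===== B-side: the bucket-building loop =====
lemma csl_getD_modify (l : List (List Int)) (i : Nat) (f : List Int → List Int) (j : Nat)
    (hj : j < l.length) :
    (l.modify i f).getD j [] = if i = j then f (l.getD j []) else l.getD j [] := by
  have hj' : j < (l.modify i f).length := by simpa using hj
  rw [List.getD_eq_getElem?_getD, List.getElem?_eq_getElem hj', List.getElem_modify,
    List.getD_eq_getElem?_getD, List.getElem?_eq_getElem hj]
  by_cases hij : i = j <;> simp [hij]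

lemma csl_bucket_loop (L : List Int) : ∀ (bs : List (List Int)),
    (∀ x ∈ L, cslKey x < bs.length) →
    (L.foldl (fun bs x => bs.modify (cslKey x) (fun b => b ++ [x])) bs).length = bs.length ∧
    ∀ j : Nat, j < bs.length →
      (L.foldl (fun bs x => bs.modify (cslKey x) (fun b => b ++ [x])) bs).getD j []
        = bs.getD j [] ++ L.filter (fun y => cslKey y = j) := by
  induction L with
  | nil => intro bs _; simp
  | cons x r ih =>
    intro bs h
    obtain ⟨hlen, hget⟩ := ih (bs.modify (cslKey x) (fun b => b ++ [x]))
      (fun y hy => by simpa using h y (by simp [hy]))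
    refine ⟨by simpa using hlen, ?_⟩
    intro j hj
    rw [List.foldl_cons, hget j (by simpa using hj), csl_getD_modify bs _ _ _ hj,
      List.filter_cons]
    by_cases hij : cslKey x = j
    · simp [hij]
    · simp [hij]

-- ===== assembling each side =====
lemma csl_getElem_eq_getD {α : Type} (l : List α) (p : Nat) (h : p < l.length) (d : α) :
    l[p] = l.getD p d := by
  rw [List.getD_eq_getElem?_getD, List.getElem?_eq_getElem h]
  rfl

lemma csl_portA_eq_flat (A : List Int) (mx : Int)
    (hmax : PySem.List.max? A (fun y => y) = some mx)
    (hkeys : ∀ x ∈ A, cslKey x < cslKey mx + 1) :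
    counting_sort_length A = cslFlat A (cslKey mx) := by
  unfold counting_sort_length
  rw [hmax]
  simp only
  set m' := cslKey mx + 1 with hm'
  -- 1. the count loop
  rw [PySem.List.foldl_pyRange_zero_pyGetD' A 0
    (fun c x => c.set (cslKey x) (c.getD (cslKey x) 0 + 1)) (List.replicate m' (0 : Int))]
  obtain ⟨hclen, hcget⟩ := csl_count_loop A (List.replicate m' (0 : Int))
    (fun x hx => by simpa using hkeys x hx)
  set count := A.foldl (fun c x => c.set (cslKey x) (c.getD (cslKey x) 0 + 1))
    (List.replicate m' (0 : Int)) with hcount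
  have hcget' : ∀ j : Nat, count.getD j 0 = (cslCnt A j : Int) := by
    intro j; rw [hcget j, csl_getD_replicate _ _ _ _ rfl]; ring
  -- 2. the accum loop
  have hstep : (fun a i => PySem.List.pySetD a i
      (PySem.List.pyGetD count i 0 + PySem.List.pyGetD a (i - 1) 0)) = cslAccumStep count := rfl
  rw [hstep]
  obtain ⟨halen, haget⟩ := csl_accum_loop A count m' (by omega) hcget' m' (le_refl m')
  set accum := (PySem.List.pyRange 0 (m' : Int) 1).foldl (cslAccumStep count)
    (List.replicate m' (0 : Int)) with haccum
  -- 3. the backward loop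
  have hstep2 : (fun (s : List Int × List Int) i =>
      (PySem.List.pySetD s.1
        (PySem.List.pyGetD s.2 ((cslKey (PySem.List.pyGetD A i 0) : Nat) : Int) 0 - 1)
        (PySem.List.pyGetD A i 0),
       PySem.List.pySetD s.2 ((cslKey (PySem.List.pyGetD A i 0) : Nat) : Int)
        (PySem.List.pyGetD s.2 ((cslKey (PySem.List.pyGetD A i 0) : Nat) : Int) 0 - 1)))
      = (fun s i => cslStepF (PySem.List.pyGetD A i 0) s) := rfl
  rw [hstep2, csl_back_loop_eq_foldr A A.length (le_refl _), List.take_length]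
  -- 4. positional reading of the result
  have hkeys' : ∀ x ∈ A, cslKey x < accum.length := by
    intro x hx; rw [halen]; exact hkeys x hx
  have hcntle : ∀ k : Nat, (cslCnt A k : Int) ≤ accum.getD k 0 := by
    intro k
    rw [haget k]
    by_cases hk : k < m'
    · rw [if_pos hk]
      have h1 := cslPl_succ A k
      have h2 : cslCnt A k ≤ cslPl A (k + 1) := by omega
      exact_mod_cast h2
    · rw [if_neg hk, cslCnt_zero_of_ge A m' k hkeys (by omega)]
      simp
  obtain ⟨holen, _, _⟩ := csl_foldr_state A (List.replicate A.length (0 : Int)) accum hkeys'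
  have hn : cslPl A m' = A.length := cslPl_top A m' hkeys
  have hflatlen : (cslFlat A (cslKey mx)).length = A.length := by
    unfold cslFlat
    rw [csl_flatlen, ← hm', hn]
  apply List.ext_getElem
  · rw [holen, hflatlen]; simp
  · intro p h1 h2
    have hp : p < A.length := by simpa using hflatlen ▸ h2
    rw [csl_getElem_eq_getD _ _ _ 0, csl_getElem_eq_getD _ _ _ 0]
    rw [csl_foldr_out A (List.replicate A.length (0 : Int)) accum hkeys' hcntle p (by simpa)]
    obtain ⟨k, j, hkm, hj, hpeq⟩ := csl_decomp A m' p (by omega)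
    rw [csl_firstHit_spec A m' accum haget hkeys A [] (by simp) k j p hj (by simp [cslCnt]) hpeq]
    unfold cslFlat
    rw [← hm', hpeq, csl_flat_getD A m' k j hkm hj]
    rfl

lemma csl_portB_eq_flat (A : List Int) (mx : Int)
    (hmax : PySem.List.max? A (fun y => y) = some mx)
    (hkeys : ∀ x ∈ A, cslKey x < cslKey mx + 1) :
    counting_sort_length_alt A = cslFlat A (cslKey mx) := by
  unfold counting_sort_length_alt
  rw [hmax]
  simp only
  set m' := cslKey mx + 1 with hm'
  obtain ⟨hblen, hbget⟩ := csl_bucket_loop A (List.replicate m' ([] : List Int))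
    (fun x hx => by simpa using hkeys x hx)
  set buckets := A.foldl (fun bs x => bs.modify (cslKey x) (fun b => b ++ [x]))
    (List.replicate m' ([] : List Int)) with hbuckets
  rw [PySem.List.foldl_append_eq_flatten, List.nil_append]
  have hb : buckets = (List.range m').map (fun k => A.filter (fun x => cslKey x = k)) := by
    apply List.ext_getElem
    · rw [hblen]; simp
    · intro j h1 h2
      have hj : j < m' := by simpa using h2
      rw [csl_getElem_eq_getD _ _ _ ([] : List Int),
        hbget j (by simpa using hj), csl_getD_replicate _ _ _ _ rfl]
      simp
  rw [hb]
  unfold cslFlat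
  rw [← hm', List.flatMap_def]

lemma csl_main (A : List Int) (hpre : Pre_counting_sort_length A) :
    counting_sort_length A = counting_sort_length_alt A := by
  obtain ⟨hne, hub⟩ := hpre
  obtain ⟨mx, hmax⟩ : ∃ mx, PySem.List.max? A (fun y => y) = some mx := by
    cases h : PySem.List.max? A (fun y => y) with
    | none => exact absurd ((PySem.List.max?_eq_none_iff A (fun y => y)).mp h) hne
    | some mx => exact ⟨mx, rfl⟩
  have hkeys : ∀ x ∈ A, cslKey x < cslKey mx + 1 := by
    intro x hx
    have h := hub x hx
    rw [hmax] at h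
    simpa using Nat.lt_succ_of_le h
  rw [csl_portA_eq_flat A mx hmax hkeys, csl_portB_eq_flat A mx hmax hkeys]

-- ===== VERDICT (by name: the statement is the Claim_ definition above) =====
theorem counting_sort_length_spec : Claim_equal_counting_sort_length := by
  intro A _ hpre
  unfold Spec_counting_sort_length
  exact csl_main A hpre
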